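-- pv_equiv track=rewrite | github.com/soitun/inferx | dashboard/app.py | build_onboard_inference_apikey_name_for_ui
-- ===== SOURCE A (Python) =====
-- def build_onboard_inference_apikey_name_for_ui(tenant_name: str, sub: str) -> str:
--     normalized_tenant = str(tenant_name or "").strip().lower()
--     normalized_sub = str(sub or "").strip().lower()
--     if normalized_tenant == "" or normalized_sub == "":
--         return ""
--
--     tenant_slug_parts = []
--     previous_was_dash = False
--     for char in normalized_tenant:
--         if char.isalnum():
--             tenant_slug_parts.append(char)
--             previous_was_dash = False
--             continue
--         if not previous_was_dash:
--             tenant_slug_parts.append("-")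
--             previous_was_dash = True
--
--     tenant_slug = "".join(tenant_slug_parts).strip("-")
--     if tenant_slug == "":
--         tenant_slug = "tenant"
--
--     sub_slug = "".join(char for char in normalized_sub if char.isalnum())
--     if sub_slug == "":
--         sub_suffix = "user"
--     else:
--         sub_suffix = sub_slug[:8]
--
--     return f"quickstart-inference-{tenant_slug}-{sub_suffix}"
-- ===== SOURCE B (Python) =====
-- def build_onboard_inference_apikey_name_for_ui(tenant_name: str, sub: str) -> str:
--     nt = (tenant_name or "").strip().lower()
--     ns = (sub or "").strip().lower()
--     if not nt or not ns:
--         return ""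
--     # map every non-alphanumeric char to '-', then drop a '-' whose predecessor is '-'
--     mapped = "".join(c if c.isalnum() else "-" for c in nt)
--     collapsed = mapped[0] + "".join(
--         b for a, b in zip(mapped, mapped[1:]) if not (a == "-" and b == "-")
--     )
--     tenant_slug = collapsed.strip("-") or "tenant"
--     sub_suffix = "".join(c for c in ns if c.isalnum())[:8] or "user"
--     return f"quickstart-inference-{tenant_slug}-{sub_suffix}"
-- ===== Notes on version B (the rewrite author's own statement) =====
-- stated objective: alternative
-- what changed: Replaces A's stateful previous_was_dash loop by a two-stage data-parallel pipeline: map every non-alphanumeric char to '-', then drop each '-' whose predecessor (paired via zip with the shifted string) is also '-', before the same strip('-') and fallbacks.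
import Mathlib
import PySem

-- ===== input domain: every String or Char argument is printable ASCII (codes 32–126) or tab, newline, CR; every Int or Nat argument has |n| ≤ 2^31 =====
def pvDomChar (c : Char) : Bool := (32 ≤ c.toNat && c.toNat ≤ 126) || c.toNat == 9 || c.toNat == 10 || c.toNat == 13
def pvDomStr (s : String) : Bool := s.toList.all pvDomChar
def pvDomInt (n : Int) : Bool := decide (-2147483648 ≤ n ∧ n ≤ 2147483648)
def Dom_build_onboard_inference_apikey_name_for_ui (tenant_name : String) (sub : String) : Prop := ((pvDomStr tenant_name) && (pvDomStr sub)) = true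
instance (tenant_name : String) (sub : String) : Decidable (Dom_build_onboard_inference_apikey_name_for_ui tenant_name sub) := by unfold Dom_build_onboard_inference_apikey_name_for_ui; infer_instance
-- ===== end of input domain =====

-- B replaces A's stateful previous_was_dash loop by: map each non-alphanumeric char to '-',
-- then drop every '-' whose predecessor (via zip with the tail) is also '-'; alternative
-- decomposition, same cost.

-- ===== PORT A =====
-- A's loop state: (tenant_slug_parts as chars, previous_was_dash)
def pvAStep (st : List Char × Bool) (c : Char) : List Char × Bool :=
  if PySem.Chars.isalnum c then (st.1 ++ [c], false)
  else if st.2 = false then (st.1 ++ ['-'], true)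
  else st

def build_onboard_inference_apikey_name_for_ui (tenant_name : String) (sub : String) : String :=
  -- 'tenant_name or ""' and 'str(...)' are the identity on a str argument
  let normalized_tenant := PySem.Chars.lower (PySem.Chars.strip tenant_name.toList)
  let normalized_sub := PySem.Chars.lower (PySem.Chars.strip sub.toList)
  if normalized_tenant = [] ∨ normalized_sub = [] then "" else
    let parts := (List.foldl pvAStep ([], false) normalized_tenant).1
    let slug0 := PySem.Chars.stripChars parts ['-']
    let tenant_slug := if slug0 = [] then "tenant".toList else slug0
    let sub_slug := normalized_sub.filter (fun c => PySem.Chars.isalnum c)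
    let sub_suffix := if sub_slug = [] then "user".toList
                      else PySem.List.slice sub_slug none (some 8)
    String.ofList ("quickstart-inference-".toList ++ tenant_slug ++ ['-'] ++ sub_suffix)

-- ===== PORT B =====
def pvMapDash (c : Char) : Char := if PySem.Chars.isalnum c then c else '-'

def build_onboard_inference_apikey_name_for_ui_alt (tenant_name : String) (sub : String) : String :=
  let nt := PySem.Chars.lower (PySem.Chars.strip tenant_name.toList)
  let ns := PySem.Chars.lower (PySem.Chars.strip sub.toList)
  if nt = [] ∨ ns = [] then "" else
    let mapped := nt.map pvMapDash
    -- mapped[0] + ''.join(b for a, b in zip(mapped, mapped[1:]) if not (a == '-' and b == '-'))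
    let collapsed :=
      match mapped with
      | [] => []          -- unreachable: nt ≠ [] here (Python would raise on mapped[0])
      | m0 :: rest =>
        m0 :: ((List.zip (m0 :: rest) rest).filter
                 (fun p => !(p.1 == '-' && p.2 == '-'))).map Prod.snd
    let tenant_slug0 := PySem.Chars.stripChars collapsed ['-']
    let tenant_slug := if tenant_slug0 = [] then "tenant".toList else tenant_slug0
    let s8 := (ns.filter (fun c => PySem.Chars.isalnum c)).take 8
    let sub_suffix := if s8 = [] then "user".toList else s8
    String.ofList ("quickstart-inference-".toList ++ tenant_slug ++ ['-'] ++ sub_suffix)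

-- ===== PRECONDITION & SPEC =====
def Spec_build_onboard_inference_apikey_name_for_ui (tenant_name : String) (sub : String) (out : String) : Prop := out = build_onboard_inference_apikey_name_for_ui_alt tenant_name sub
instance (tenant_name : String) (sub : String) (out : String) : Decidable (Spec_build_onboard_inference_apikey_name_for_ui tenant_name sub out) := by unfold Spec_build_onboard_inference_apikey_name_for_ui; infer_instance

-- ===== CLAIM (what is proved, stated in full; the proofs are below) =====
def Claim_equal_build_onboard_inference_apikey_name_for_ui : Prop := ∀ (tenant_name : String) (sub : String), Dom_build_onboard_inference_apikey_name_for_ui tenant_name sub → Spec_build_onboard_inference_apikey_name_for_ui tenant_name sub (build_onboard_inference_apikey_name_for_ui tenant_name sub)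

-- ===== LEMMAS AND PROOFS =====

-- recursive form of A's loop (p = previous_was_dash)
def pvRecA (p : Bool) : List Char → List Char
  | [] => []
  | c :: cs =>
    if PySem.Chars.isalnum c then c :: pvRecA false cs
    else if p = false then '-' :: pvRecA true cs else pvRecA p cs

-- what B's zip-filter keeps, phrased with the predecessor abstracted to "was it a dash"
def pvAfter2 (b : Bool) : List Char → List Char
  | [] => []
  | m :: ms => (if b && (m == '-') then [] else [m]) ++ pvAfter2 (m == '-') ms

lemma pvFoldA (cs : List Char) : ∀ acc p,
    (List.foldl pvAStep (acc, p) cs).1 = acc ++ pvRecA p cs := by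
  induction cs with
  | nil => intro acc p; simp [pvRecA]
  | cons c cs ih =>
    intro acc p
    by_cases h : PySem.Chars.isalnum c = true
    · simp [pvAStep, pvRecA, h, ih]
    · cases p <;> simp [pvAStep, pvRecA, h, ih]

lemma pvAlnumNeDash {c : Char} (h : PySem.Chars.isalnum c = true) : (c == '-') = false := by
  rcases eq_or_ne c '-' with rfl | hne
  · exact absurd h (by decide)
  · simp [hne]

lemma pvZipFilter (ms : List Char) : ∀ a : Char,
    ((List.zip (a :: ms) ms).filter (fun p => !(p.1 == '-' && p.2 == '-'))).map Prod.snd =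
      pvAfter2 (a == '-') ms := by
  induction ms with
  | nil => intro a; simp [pvAfter2]
  | cons m rest ih =>
    intro a
    show ((((a, m) :: List.zip (m :: rest) rest).filter
            (fun p => !(p.1 == '-' && p.2 == '-'))).map Prod.snd) = _
    rw [List.filter_cons, apply_ite (List.map Prod.snd), List.map_cons, ih m]
    by_cases ha : a = '-' <;> by_cases hm : m = '-' <;>
      simp [pvAfter2, ha, hm]

lemma pvRecA_eq_after2 (cs : List Char) : ∀ p,
    pvRecA p cs = pvAfter2 p (cs.map pvMapDash) := by
  induction cs with
  | nil => intro p; simp [pvRecA, pvAfter2]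
  | cons c cs ih =>
    intro p
    by_cases h : PySem.Chars.isalnum c = true
    · simp [pvRecA, pvAfter2, pvMapDash, h, pvAlnumNeDash h, ih]
    · cases p <;> simp [pvRecA, pvAfter2, pvMapDash, h, ih]

-- A's collapsed parts equal B's collapsed chars, before stripping
lemma pvPartsEq (nt : List Char) :
    (List.foldl pvAStep ([], false) nt).1 =
      (match nt.map pvMapDash with
       | [] => ([] : List Char)
       | m0 :: rest =>
         m0 :: ((List.zip (m0 :: rest) rest).filter
                  (fun p => !(p.1 == '-' && p.2 == '-'))).map Prod.snd) := by
  have hA : (List.foldl pvAStep ([], false) nt).1 = pvRecA false nt := by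
    simpa using pvFoldA nt [] false
  rw [hA, pvRecA_eq_after2 nt false]
  cases hm : nt.map pvMapDash with
  | nil => simp [pvAfter2]
  | cons m0 rest =>
    rw [show pvAfter2 false (m0 :: rest) = m0 :: pvAfter2 (m0 == '-') rest from by
          simp [pvAfter2],
        ← pvZipFilter rest m0]

-- ===== VERDICT (by name: the statement is the Claim_ definition above) =====
theorem build_onboard_inference_apikey_name_for_ui_spec : Claim_equal_build_onboard_inference_apikey_name_for_ui := by
  intro tenant_name sub _
  unfold Spec_build_onboard_inference_apikey_name_for_ui
  unfold build_onboard_inference_apikey_name_for_ui build_onboard_inference_apikey_name_for_ui_alt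
  set nt := PySem.Chars.lower (PySem.Chars.strip tenant_name.toList) with hnt
  set ns := PySem.Chars.lower (PySem.Chars.strip sub.toList) with hns
  by_cases h0 : nt = [] ∨ ns = []
  · rw [if_pos h0, if_pos h0]
  · rw [if_neg h0, if_neg h0]
    dsimp only
    rw [pvPartsEq nt]
    have hsub : (if ns.filter (fun c => PySem.Chars.isalnum c) = [] then "user".toList
          else PySem.List.slice (ns.filter (fun c => PySem.Chars.isalnum c)) none (some 8)) =
        (if (ns.filter (fun c => PySem.Chars.isalnum c)).take 8 = [] then "user".toList
          else (ns.filter (fun c => PySem.Chars.isalnum c)).take 8) := by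
      rw [PySem.List.slice_to (ns.filter (fun c => PySem.Chars.isalnum c)) (by norm_num)]
      by_cases hf : ns.filter (fun c => PySem.Chars.isalnum c) = [] <;>
        simp [hf, List.take_eq_nil_iff]
    rw [hsub]
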